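-- pv_equiv track=rewrite | github.com/corutopi/AtCorder_python | AtCoderBeginnerContest/2XX/237/C.py | real_solve
-- ===== SOURCE A (Python) =====
-- def real_solve(S):
--     for i in range(0, 11):
--         s = 'a' * i + S
--         for i in range(len(s)):
--             if s[i] != s[len(s) - i - 1]:
--                 break
--         else:
--             return 'Yes'
--     return 'No'
-- ===== SOURCE B (Python) =====
-- def real_solve(S):
--     # Count the maximal leading run of 'a'; prepending i 'a's makes it L+i,
--     # and a palindrome needs leading run == trailing run, so test the unique i = T-L.
--     L = 0
--     while L < len(S) and S[L] == 'a':
--         L += 1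
--     if L == len(S):
--         return 'Yes'          # S is all 'a' (or empty): already a palindrome
--     R = S[::-1]
--     T = 0
--     while R[T] == 'a':        # safe: S has a non-'a' character
--         T += 1
--     core = S[L:len(S) - T]
--     if L <= T <= L + 10 and core == core[::-1]:
--         return 'Yes'
--     return 'No'
-- ===== Notes on version B (the rewrite author's own statement) =====
-- stated objective: simpler
-- what changed: Instead of trying all 11 prepend counts and re-scanning each candidate string, B counts the leading run L and trailing run T of the letter a and tests the single candidate count T - L: answer is Yes iff S consists only of that letter, or 0 <= T - L <= 10 and the core S[L:len(S)-T] is a palindrome.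
import Mathlib
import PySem

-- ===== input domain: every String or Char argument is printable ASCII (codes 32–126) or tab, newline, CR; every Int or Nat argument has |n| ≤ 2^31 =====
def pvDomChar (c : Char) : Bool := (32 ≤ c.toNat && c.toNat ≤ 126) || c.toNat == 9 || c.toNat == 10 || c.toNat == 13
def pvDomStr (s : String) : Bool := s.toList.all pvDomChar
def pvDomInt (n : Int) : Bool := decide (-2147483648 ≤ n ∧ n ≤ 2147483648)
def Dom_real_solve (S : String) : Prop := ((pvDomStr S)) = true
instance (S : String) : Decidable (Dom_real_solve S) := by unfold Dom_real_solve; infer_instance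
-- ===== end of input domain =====

-- B replaces A's 11-way brute force by counting the leading/trailing runs of 'a'
-- and testing the single candidate prepend count i = T - L (objective: simpler).

-- ===== PORT A =====
-- inner 'for i in range(len(s)): if s[i] != s[len(s)-i-1]: break / else:' — true iff no break
def palLoop (s : List Char) (i : Nat) : Bool :=
  if h : i < s.length then
    if s[i] ≠ s[s.length - i - 1]'(by omega) then false
    else palLoop s (i + 1)
  else true
termination_by s.length - i

-- outer 'for i in range(0, 11): s = 'a'*i + S; … return 'Yes'' / 'return 'No''
def goA (l : List Char) (i : Nat) : String :=
  if i ≤ 10 then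
    if palLoop (List.replicate i 'a' ++ l) 0 then "Yes" else goA l (i + 1)
  else "No"
termination_by 11 - i

def real_solve (S : String) : String := goA S.toList 0

-- ===== PORT B =====
-- 'while L < len(S) and S[L] == 'a': L += 1' — count of the leading run of 'a'
def runA : List Char → Nat
  | [] => 0
  | c :: cs => if c = 'a' then runA cs + 1 else 0

-- transliteration of Source B; S[L:len(S)-T] is exactly drop L / take (len-T-L) here
-- (0 ≤ L ≤ len, 0 ≤ len-T), and 'while R[T] == 'a'' is the leading run of S[::-1]
def real_solve_alt (S : String) : String :=
  let l := S.toList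
  let L := runA l
  if L = l.length then "Yes"
  else
    let T := runA l.reverse
    let core := (l.drop L).take (l.length - T - L)
    if L ≤ T ∧ T ≤ L + 10 ∧ core.reverse = core then "Yes" else "No"

-- ===== PRECONDITION & SPEC =====
def Spec_real_solve (S : String) (out : String) : Prop := out = real_solve_alt S
instance (S : String) (out : String) : Decidable (Spec_real_solve S out) := by unfold Spec_real_solve; infer_instance

-- ===== CLAIM (what is proved, stated in full; the proofs are below) =====
def Claim_equal_real_solve : Prop := ∀ (S : String), Dom_real_solve S → Spec_real_solve S (real_solve S)

-- ===== LEMMAS AND PROOFS =====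

theorem palLoop_iff (s : List Char) : ∀ (k i : Nat), s.length ≤ i + k →
    (palLoop s i = true ↔ ∀ j, i ≤ j → ∀ (h : j < s.length), s[j] = s[s.length - j - 1]'(by omega)) := by
  intro k
  induction k with
  | zero =>
    intro i hi
    rw [palLoop]
    rw [dif_neg (by omega)]
    constructor
    · intro _ j hij hj; omega
    · intro _; rfl
  | succ k ih =>
    intro i hi
    rw [palLoop]
    by_cases h : i < s.length
    · rw [dif_pos h]
      by_cases he : s[i] = s[s.length - i - 1]'(by omega)
      · rw [if_neg (by simpa using he)]
        rw [ih (i + 1) (by omega)]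
        constructor
        · intro hall j hij hj
          rcases Nat.eq_or_lt_of_le hij with rfl | hlt
          · exact he
          · exact hall j hlt hj
        · intro hall j hij hj
          exact hall j (by omega) hj
      · rw [if_pos (by simpa using he)]
        constructor
        · intro hf; exact absurd hf (by simp)
        · intro hall; exact absurd (hall i le_rfl h) he
    · rw [dif_neg h]
      constructor
      · intro _ j hij hj; omega
      · intro _; rfl

theorem pal_zero (s : List Char) : palLoop s 0 = true ↔ s.reverse = s := by
  rw [palLoop_iff s s.length 0 (by omega)]
  constructor
  · intro hall
    apply List.ext_getElem (by simp)
    intro i h1 h2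
    rw [List.getElem_reverse]
    have heq : s.length - 1 - i = s.length - i - 1 := by omega
    simp only [heq]
    exact (hall i (Nat.zero_le _) h2).symm
  · intro hrev j _ hj
    have h2 : s.reverse[j]'(by simpa using hj) = s[j] := List.getElem_of_eq hrev _
    have h1 : s.reverse[j]'(by simpa using hj) = s[s.length - 1 - j]'(by omega) :=
      List.getElem_reverse _
    have h3 : s.length - 1 - j = s.length - j - 1 := by omega
    rw [← h2, h1]
    simp only [h3]

theorem runA_le (l : List Char) : runA l ≤ l.length := by
  induction l with
  | nil => simp [runA]
  | cons c cs ih =>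
    simp only [runA, List.length_cons]
    split <;> omega

theorem runA_rep_append (k : Nat) (l : List Char) :
    runA (List.replicate k 'a' ++ l) = k + runA l := by
  induction k with
  | zero => simp
  | succ k ih => simp [List.replicate_succ, runA, ih]; omega

theorem runA_rep (k : Nat) : runA (List.replicate k 'a') = k := by
  have := runA_rep_append k []
  simpa [runA] using this

theorem runA_cons_ne {c : Char} (cs : List Char) (h : c ≠ 'a') : runA (c :: cs) = 0 := by
  simp [runA, h]

theorem runA_decomp (l : List Char) :
    List.replicate (runA l) 'a' ++ l.drop (runA l) = l := by
  induction l with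
  | nil => simp [runA]
  | cons c cs ih =>
    by_cases h : c = 'a'
    · subst h; simp [runA, List.replicate_succ, ih]
    · simp [runA_cons_ne cs h]

theorem runA_eq_len (l : List Char) (h : runA l = l.length) :
    l = List.replicate l.length 'a' := by
  have := runA_decomp l
  rw [h] at this
  simpa using this.symm

theorem runA_lt (l : List Char) (h : runA l < l.length) :
    ∃ c cs, l.drop (runA l) = c :: cs ∧ c ≠ 'a' := by
  induction l with
  | nil => simp at h
  | cons c cs ih =>
    by_cases hc : c = 'a'
    · subst hc
      have hr : runA ('a' :: cs) = runA cs + 1 := by simp [runA]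
      have h' : runA cs < cs.length := by
        rw [hr] at h; simp at h; omega
      have hd : ('a' :: cs).drop (runA ('a' :: cs)) = cs.drop (runA cs) := by
        rw [hr]; simp
      rw [hd]; exact ih h' 
    · exact ⟨c, cs, by simp [runA_cons_ne cs hc], hc⟩

theorem goA_yes_or_no (l : List Char) : ∀ (k i : Nat), 11 ≤ i + k →
    goA l i = "Yes" ∨ goA l i = "No" := by
  intro k
  induction k with
  | zero =>
    intro i hi
    rw [goA, if_neg (by omega)]
    exact Or.inr rfl
  | succ k ih =>
    intro i hi
    rw [goA]
    by_cases h : i ≤ 10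
    · rw [if_pos h]
      by_cases hp : palLoop (List.replicate i 'a' ++ l) 0 = true
      · rw [if_pos hp]; exact Or.inl rfl
      · rw [if_neg hp]; exact ih (i + 1) (by omega)
    · rw [if_neg h]; exact Or.inr rfl

theorem goA_yes_iff (l : List Char) : ∀ (k i : Nat), 11 ≤ i + k →
    (goA l i = "Yes" ↔
      ∃ j, i ≤ j ∧ j ≤ 10 ∧ palLoop (List.replicate j 'a' ++ l) 0 = true) := by
  intro k
  induction k with
  | zero =>
    intro i hi
    rw [goA, if_neg (by omega)]
    constructor
    · intro h; exact absurd h (by simp)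
    · rintro ⟨j, hij, hj, _⟩; omega
  | succ k ih =>
    intro i hi
    rw [goA]
    by_cases h : i ≤ 10
    · rw [if_pos h]
      by_cases hp : palLoop (List.replicate i 'a' ++ l) 0 = true
      · rw [if_pos hp]
        exact ⟨fun _ => ⟨i, le_rfl, h, hp⟩, fun _ => rfl⟩
      · rw [if_neg hp]
        rw [ih (i + 1) (by omega)]
        constructor
        · rintro ⟨j, hij, hj, hpj⟩; exact ⟨j, by omega, hj, hpj⟩
        · rintro ⟨j, hij, hj, hpj⟩
          rcases Nat.eq_or_lt_of_le hij with rfl | hlt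
          · exact absurd hpj hp
          · exact ⟨j, hlt, hj, hpj⟩
    · rw [if_neg h]
      constructor
      · intro hno; exact absurd hno (by simp)
      · rintro ⟨j, hij, hj, _⟩; omega

-- The core decomposition and the palindrome criterion for 'a'*i + l.
theorem key_pal_iff (l : List Char) (hL : runA l < l.length) (i : Nat) :
    let L := runA l
    let T := runA l.reverse
    let core := (l.drop L).take (l.length - T - L)
    ((List.replicate i 'a' ++ l).reverse = List.replicate i 'a' ++ l ↔
      (i + L = T ∧ core.reverse = core)) := by
  intro L T core
  -- T < length
  have hTle : T ≤ l.length := by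
    have := runA_le l.reverse; simpa using this
  have hTlt : T < l.length := by
    rcases Nat.eq_or_lt_of_le hTle with heq | h
    · exfalso
      have hrev := runA_eq_len l.reverse (by simpa using heq)
      have : l = List.replicate l.length 'a' := by
        have := congrArg List.reverse hrev
        simpa using this
      rw [this] at hL
      simp [runA_rep] at hL
    · exact h
  -- first non-'a' after the leading run
  obtain ⟨c, cs, hdrop, hc⟩ := runA_lt l hL
  obtain ⟨d, ds, hdropR, hd⟩ := runA_lt l.reverse (by simpa using hTlt)
  -- suffix decomposition: l = X ++ replicate T 'a', X.length = l.length - T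
  have hsuf : l = (l.reverse.drop T).reverse ++ List.replicate T 'a' := by
    have h1 := runA_decomp l.reverse
    have := congrArg List.reverse h1
    simpa using this.symm
  have hXlen : (l.reverse.drop T).reverse.length = l.length - T := by simp
  -- drop at n - T is the replicate suffix
  have hdropNT : l.drop (l.length - T) = List.replicate T 'a' := by
    have h0 : ((l.reverse.drop T).reverse ++ List.replicate T 'a').drop
        ((l.reverse.drop T).reverse.length) = List.replicate T 'a' := by
      simp
    rw [hXlen] at h0
    rw [← hsuf] at h0
    exact h0
  -- L + T < length
  have hLT : L + T < l.length := by
    by_contra hcon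
    have h1 : l.drop L = (l.drop (l.length - T)).drop (L - (l.length - T)) := by
      rw [List.drop_drop]
      congr 1
      omega
    rw [hdropNT, List.drop_replicate, hdrop] at h1
    exact hc (List.eq_of_mem_replicate (h1 ▸ (by simp : c ∈ c :: cs)))
  -- mid = core ++ replicate T 'a'
  have hmid : l.drop L = core ++ List.replicate T 'a' := by
    have h1 : l.drop L = (l.drop L).take (l.length - T - L) ++ (l.drop L).drop (l.length - T - L) :=
      (List.take_append_drop _ _).symm
    rw [List.drop_drop] at h1
    have h2 : L + (l.length - T - L) = l.length - T := by omega
    rw [h2, hdropNT] at h1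
    exact h1
  -- full decomposition
  have hfull : l = List.replicate L 'a' ++ core ++ List.replicate T 'a' := by
    conv_lhs => rw [← runA_decomp l]
    rw [hmid, List.append_assoc]
  -- core starts with c ≠ 'a'
  have hcore : core = c :: cs.take (l.length - T - L - 1) := by
    show (l.drop L).take (l.length - T - L) = _
    rw [hdrop]
    have : l.length - T - L = (l.length - T - L - 1) + 1 := by omega
    rw [this, List.take_succ_cons]
    simp
  -- core.reverse starts with d ≠ 'a'
  have hcorerev : ∃ es, core.reverse = d :: es := by
    have hrevfull : l.reverse = List.replicate T 'a' ++ (core.reverse ++ List.replicate L 'a') := by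
      have := congrArg List.reverse hfull
      simpa [List.append_assoc] using this
    have hdrT : l.reverse.drop T = core.reverse ++ List.replicate L 'a' := by
      rw [hrevfull, List.drop_append_of_le_length (by simp)]
      simp
    rw [hdropR] at hdrT
    have hne : core.reverse ≠ [] := by simp [hcore]
    rcases hexp : core.reverse with _ | ⟨e, es⟩
    · exact absurd hexp hne
    · rw [hexp] at hdrT
      simp at hdrT
      exact ⟨es, by rw [hdrT.1]⟩
  obtain ⟨es, hes⟩ := hcorerev
  -- p and its reverse in decomposed form
  have hp : List.replicate i 'a' ++ l =
      List.replicate (i + L) 'a' ++ (core ++ List.replicate T 'a') := by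
    rw [hfull, List.replicate_add, List.append_assoc, List.append_assoc]
  have hprev : (List.replicate i 'a' ++ l).reverse =
      List.replicate T 'a' ++ (core.reverse ++ List.replicate (i + L) 'a') := by
    rw [hp]
    simp [List.append_assoc]
  constructor
  · intro hpal
    have hruns : runA (List.replicate i 'a' ++ l).reverse = runA (List.replicate i 'a' ++ l) := by
      rw [hpal]
    rw [hprev, hp, runA_rep_append, runA_rep_append] at hruns
    have hz1 : runA (core ++ List.replicate T 'a') = 0 := by
      rw [hcore, List.cons_append]
      exact runA_cons_ne _ hc
    have hz2 : runA (core.reverse ++ List.replicate (i + L) 'a') = 0 := by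
      rw [hes, List.cons_append]
      exact runA_cons_ne _ hd
    rw [hz1, hz2] at hruns
    have hiLT : i + L = T := by omega
    refine ⟨hiLT, ?_⟩
    rw [hprev, hp, hiLT] at hpal
    have h1 := List.append_cancel_left hpal
    exact List.append_cancel_right h1
  · rintro ⟨hiLT, hpal⟩
    rw [hprev, hp, hiLT, hpal]

-- ===== VERDICT (by name: the statement is the Claim_ definition above) =====
theorem real_solve_spec : Claim_equal_real_solve := by
  intro S _
  show real_solve S = real_solve_alt S
  unfold real_solve real_solve_alt
  set l := S.toList with hl
  by_cases hL : runA l = l.length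
  · rw [if_pos hL]
    have hrep := runA_eq_len l hL
    have hpal : l.reverse = l := by
      conv_lhs => rw [hrep]
      rw [List.reverse_replicate, ← hrep]
    rw [goA, if_pos (by omega)]
    rw [if_pos (by simpa using (pal_zero l).mpr hpal)]
  · rw [if_neg hL]
    have hLlt : runA l < l.length := lt_of_le_of_ne (runA_le l) hL
    set L := runA l with hLdef
    set T := runA l.reverse with hTdef
    set core := (l.drop L).take (l.length - T - L) with hcore
    have hkey := key_pal_iff l hLlt
    by_cases hc : L ≤ T ∧ T ≤ L + 10 ∧ core.reverse = core
    · rw [if_pos hc]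
      rw [goA_yes_iff l 11 0 (by omega)]
      refine ⟨T - L, Nat.zero_le _, by omega, ?_⟩
      rw [pal_zero]
      exact (hkey (T - L)).mpr ⟨by omega, hc.2.2⟩
    · rw [if_neg hc]
      rcases goA_yes_or_no l 11 0 (by omega) with hyes | hno
      · exfalso
        rw [goA_yes_iff l 11 0 (by omega)] at hyes
        obtain ⟨j, _, hj10, hpj⟩ := hyes
        rw [pal_zero] at hpj
        obtain ⟨hjLT, hpc⟩ := (hkey j).mp hpj
        exact hc ⟨by omega, by omega, hpc⟩
      · exact hno
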